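-- pv_equiv track=rewrite | github.com/moonstachain/ai-da-guan-jia | work/ai-da-guan-jia/scripts/ts_review_01_evidence_pull.py | build_conclusion
-- ===== SOURCE A (Python) =====
-- from typing import Any
--
-- def build_conclusion(findings: list[dict[str, Any]]) -> str:
--     confirmed = [item for item in findings if item["status"] == "confirmed"]
--     superseded = [item for item in findings if item["status"] == "superseded_by_new_evidence"]
--     followup = [item for item in findings if item["status"] == "followup"]
--     return (
--         f"Evidence verified: {len(confirmed)} confirmed, {len(superseded)} claims superseded by new evidence, "
--         f"{len(followup)} follow-up items. The review is directionally valid, but the live counts for "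
--         f"skill inventory and Kangbo L3 have drifted since the snapshot. The live-control table is reachable "
--         f"through its runtime app token and currently shows 1 record / 19 fields."
--     )
-- ===== SOURCE B (Python) =====
-- def build_conclusion(findings: list[dict[str, object]]) -> str:
--     counts = {}
--     for item in findings:
--         status = item["status"]
--         counts[status] = counts.get(status, 0) + 1
--     return (
--         f"Evidence verified: {counts.get('confirmed', 0)} confirmed, "
--         f"{counts.get('superseded_by_new_evidence', 0)} claims superseded by new evidence, "
--         f"{counts.get('followup', 0)} follow-up items. The review is directionally valid, but the live counts for "
--         f"skill inventory and Kangbo L3 have drifted since the snapshot. The live-control table is reachable "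
--         f"through its runtime app token and currently shows 1 record / 19 fields."
--     )
-- ===== Notes on version B (the rewrite author's own statement) =====
-- stated objective: simpler
-- what changed: Replaces the three list-comprehension scans (one per status) with a single pass that tallies every item's status into a dict, then reads the three counts by lookup.
import Mathlib
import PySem

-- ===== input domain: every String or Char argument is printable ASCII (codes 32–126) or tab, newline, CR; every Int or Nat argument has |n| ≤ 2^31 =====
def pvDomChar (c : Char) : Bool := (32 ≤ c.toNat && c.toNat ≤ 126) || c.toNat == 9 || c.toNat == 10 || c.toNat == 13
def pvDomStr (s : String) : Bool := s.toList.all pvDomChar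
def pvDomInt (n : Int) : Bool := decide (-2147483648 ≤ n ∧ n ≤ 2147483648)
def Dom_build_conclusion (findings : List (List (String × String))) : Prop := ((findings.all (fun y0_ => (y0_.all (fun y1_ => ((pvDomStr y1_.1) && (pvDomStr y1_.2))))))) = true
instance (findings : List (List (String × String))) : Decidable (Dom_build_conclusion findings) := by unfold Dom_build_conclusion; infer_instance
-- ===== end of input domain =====

-- B replaces A's three filtering scans by one tallying pass into a dict; objective: simpler.

-- ===== PORT A =====
-- item["status"] ; under Pre_ the key is present, so the default is never read
def pvStatus (item : List (String × String)) : String :=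
  PySem.Dict.getD (PySem.Dict.mk item) "status" ""

def build_conclusion (findings : List (List (String × String))) : String :=
  let confirmed := findings.filter (fun item => pvStatus item == "confirmed")
  let superseded := findings.filter (fun item => pvStatus item == "superseded_by_new_evidence")
  let followup := findings.filter (fun item => pvStatus item == "followup")
  "Evidence verified: " ++ PySem.Int.toStr (PySem.List.len confirmed) ++ " confirmed, "
    ++ PySem.Int.toStr (PySem.List.len superseded) ++ " claims superseded by new evidence, "
    ++ PySem.Int.toStr (PySem.List.len followup) ++ " follow-up items. The review is directionally valid, but the live counts for "
    ++ "skill inventory and Kangbo L3 have drifted since the snapshot. The live-control table is reachable "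
    ++ "through its runtime app token and currently shows 1 record / 19 fields."

-- ===== PORT B =====
def build_conclusion_alt (findings : List (List (String × String))) : String :=
  let counts : PySem.Dict String Int :=
    findings.foldl (fun d item =>
      let status := pvStatus item
      d.insert status (d.getD status 0 + 1)) PySem.Dict.empty
  "Evidence verified: " ++ PySem.Int.toStr (counts.getD "confirmed" 0) ++ " confirmed, "
    ++ PySem.Int.toStr (counts.getD "superseded_by_new_evidence" 0) ++ " claims superseded by new evidence, "
    ++ PySem.Int.toStr (counts.getD "followup" 0) ++ " follow-up items. The review is directionally valid, but the live counts for "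
    ++ "skill inventory and Kangbo L3 have drifted since the snapshot. The live-control table is reachable "
    ++ "through its runtime app token and currently shows 1 record / 19 fields."

-- ===== PRECONDITION & SPEC =====
-- Pre_: every item has a "status" key (Python A raises KeyError otherwise)
def Pre_build_conclusion (findings : List (List (String × String))) : Prop :=
  (findings.all (fun item => item.any (fun kv => kv.1 == "status"))) = true
instance (findings : List (List (String × String))) : Decidable (Pre_build_conclusion findings) := by unfold Pre_build_conclusion; infer_instance
def pvWitness_build_conclusion : (List (List (String × String))) :=
  [[("status", "confirmed")], [("status", "followup"), ("note", "x")]]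
def Spec_build_conclusion (findings : List (List (String × String))) (out : String) : Prop := out = build_conclusion_alt findings
instance (findings : List (List (String × String))) (out : String) : Decidable (Spec_build_conclusion findings out) := by unfold Spec_build_conclusion; infer_instance

-- ===== CLAIM (what is proved, stated in full; the proofs are below) =====
def Claim_equal_build_conclusion : Prop := ∀ (findings : List (List (String × String))), Dom_build_conclusion findings → Pre_build_conclusion findings → Spec_build_conclusion findings (build_conclusion findings)

-- ===== LEMMAS AND PROOFS =====

-- B's tally over findings is the Counter of the statuses, so each lookup is a count,
-- and A's filter-length computes the same count.
theorem pv_counts_gen (findings : List (List (String × String))) (s : String)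
    (d : PySem.Dict String Int) :
    (findings.foldl (fun d item =>
        let status := pvStatus item
        d.insert status (d.getD status 0 + 1)) d).getD s 0
      = d.getD s 0 + PySem.List.len (findings.filter (fun item => pvStatus item == s)) := by
  induction findings generalizing d with
  | nil => simp [PySem.List.len_eq]
  | cons item rest ih =>
    simp only [List.foldl_cons, List.filter_cons, ih]
    by_cases h : pvStatus item = s
    · simp [h, PySem.Dict.getD_insert_self, PySem.List.len_eq]
      omega
    · have hne : s ≠ pvStatus item := fun he => h he.symm
      simp [h, PySem.Dict.getD_insert_of_ne _ _ _ hne]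

-- B's tally lookup equals A's filter length.
theorem pv_counts_eq (findings : List (List (String × String))) (s : String) :
    (findings.foldl (fun d item =>
        let status := pvStatus item
        d.insert status (d.getD status 0 + 1)) PySem.Dict.empty).getD s 0
      = PySem.List.len (findings.filter (fun item => pvStatus item == s)) := by
  rw [pv_counts_gen]
  simp [PySem.Dict.empty, PySem.Dict.getD, PySem.Dict.get?]

-- ===== VERDICT (by name: the statement is the Claim_ definition above) =====
theorem build_conclusion_spec : Claim_equal_build_conclusion := by
  intro findings _ _
  unfold Spec_build_conclusion build_conclusion build_conclusion_alt
  simp only [pv_counts_eq]
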